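-- pv_equiv track=rewrite | github.com/premkalyan-dev/Text-extractor-S3-fetching- | extractor/header_extractor.py | extract_side
-- ===== SOURCE A (Python) =====
-- def extract_side(side_words):
--     if not side_words:
--         return None, None
--
--     colon_idx = next((i for i, w in enumerate(side_words) if w['text'] == ':'), None)
--
--     if colon_idx is not None:
--         label = ' '.join(w['text'] for w in side_words[:colon_idx]).strip()
--         value = ' '.join(w['text'] for w in side_words[colon_idx+1:]).strip()
--         return label, value
--     else:
--         return None, ' '.join(w['text'] for w in side_words).strip()
-- ===== SOURCE B (Python) =====
-- def extract_side(side_words):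
--     if not side_words:
--         return None, None
--     before, after, seen_colon = [], [], False
--     for w in side_words:
--         t = w['text']
--         if seen_colon:
--             after.append(t)
--         elif t == ':':
--             seen_colon = True
--         else:
--             before.append(t)
--     if seen_colon:
--         return ' '.join(before).strip(), ' '.join(after).strip()
--     return None, ' '.join(before).strip()
-- ===== Notes on version B (the rewrite author's own statement) =====
-- stated objective: alternative
-- what changed: Replaces A's enumerate/next index search plus two slice-and-join passes with a single partitioning pass that maintains a seen-colon flag and two accumulator lists.
import Mathlib
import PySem

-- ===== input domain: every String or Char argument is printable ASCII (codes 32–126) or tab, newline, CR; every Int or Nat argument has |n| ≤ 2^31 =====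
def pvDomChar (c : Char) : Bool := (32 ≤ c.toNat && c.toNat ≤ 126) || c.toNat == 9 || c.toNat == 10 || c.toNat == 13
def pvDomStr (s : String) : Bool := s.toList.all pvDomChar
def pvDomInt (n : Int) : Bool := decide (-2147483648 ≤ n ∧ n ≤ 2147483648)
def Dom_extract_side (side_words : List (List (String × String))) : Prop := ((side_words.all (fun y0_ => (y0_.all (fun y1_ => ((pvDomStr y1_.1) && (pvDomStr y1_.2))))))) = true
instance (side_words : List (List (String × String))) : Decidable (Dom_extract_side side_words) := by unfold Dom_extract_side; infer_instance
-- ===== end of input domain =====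

-- B replaces A's index-search-plus-two-slices with a single partitioning pass (flag + two accumulators); alternative decomposition, same cost.


-- ===== PORT A =====
-- w['text'] as a Python dict lookup; Pre_ guarantees the key is present, so the "" default is never used.
def pvText (w : List (String × String)) : String := (PySem.Dict.mk w).getD "text" ""

def extract_side (side_words : List (List (String × String))) : Option String × Option String :=
  if side_words.isEmpty then (none, none)
  else
    -- colon_idx = next((i for i, w in enumerate(side_words) if w['text'] == ':'), None)
    match side_words.findIdx? (fun w => pvText w == ":") with
    | some i =>
        (some (PySem.Str.strip (PySem.Str.join " " ((side_words.take i).map pvText))),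
         some (PySem.Str.strip (PySem.Str.join " " ((side_words.drop (i+1)).map pvText))))
    | none => (none, some (PySem.Str.strip (PySem.Str.join " " (side_words.map pvText))))

-- ===== PORT B =====
-- one loop step of B: route the word's text to 'before' or 'after', flipping the flag at the first ':'
def pvStep (st : List String × List String × Bool) (w : List (String × String)) :
    List String × List String × Bool :=
  match st with
  | (b, a, true) => (b, a ++ [pvText w], true)
  | (b, a, false) =>
      if pvText w == ":" then (b, a, true) else (b ++ [pvText w], a, false)

def extract_side_alt (side_words : List (List (String × String))) : Option String × Option String :=
  match side_words with
  | [] => (none, none)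
  | _ :: _ =>
      match side_words.foldl pvStep ([], [], false) with
      | (b, a, true) =>
          (some (PySem.Str.strip (PySem.Str.join " " b)),
           some (PySem.Str.strip (PySem.Str.join " " a)))
      | (b, _, false) => (none, some (PySem.Str.strip (PySem.Str.join " " b)))

-- ===== PRECONDITION & SPEC =====
-- Pre_ excludes inputs where some word dict lacks the 'text' key: there both Pythons raise KeyError.
def Pre_extract_side (side_words : List (List (String × String))) : Prop :=
  ∀ w ∈ side_words, (w.any (fun p => p.1 == "text")) = true
instance (side_words : List (List (String × String))) : Decidable (Pre_extract_side side_words) := by unfold Pre_extract_side; infer_instance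

def pvWitness_extract_side : (List (List (String × String))) :=
  [[("text", "Name")], [("text", ":")], [("text", "Bob")]]

def Spec_extract_side (side_words : List (List (String × String))) (out : Option String × Option String) : Prop := out = extract_side_alt side_words
instance (side_words : List (List (String × String))) (out : Option String × Option String) : Decidable (Spec_extract_side side_words out) := by unfold Spec_extract_side; infer_instance

-- ===== CLAIM (what is proved, stated in full; the proofs are below) =====
def Claim_equal_extract_side : Prop := ∀ (side_words : List (List (String × String))), Dom_extract_side side_words → Pre_extract_side side_words → Spec_extract_side side_words (extract_side side_words)

-- ===== LEMMAS AND PROOFS =====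

-- once the flag is set, the loop only appends texts to 'after'
theorem pvStep_foldl_true (ws : List (List (String × String))) (b a : List String) :
    ws.foldl pvStep (b, a, true) = (b, a ++ ws.map pvText, true) := by
  induction ws generalizing a with
  | nil => simp
  | cons w ws ih => simp [pvStep, ih]

-- before the flag is set, the fold is characterised by the first colon index
theorem pvStep_foldl_false (ws : List (List (String × String))) (b : List String) :
    ws.foldl pvStep (b, [], false) =
      match ws.findIdx? (fun w => pvText w == ":") with
      | some i => (b ++ (ws.take i).map pvText, (ws.drop (i+1)).map pvText, true)
      | none => (b ++ ws.map pvText, [], false) := by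
  induction ws generalizing b with
  | nil => simp
  | cons w ws ih =>
    by_cases h : pvText w == ":"
    · simp [List.findIdx?_cons, h, pvStep, pvStep_foldl_true]
    · simp only [List.foldl_cons, pvStep, h, Bool.false_eq_true, if_false]
      rw [ih]
      simp only [List.findIdx?_cons, h, Bool.false_eq_true, if_false]
      cases hf : ws.findIdx? (fun w => pvText w == ":") <;>
        simp [List.take_succ_cons, List.drop_succ_cons]

-- ===== VERDICT (by name: the statement is the Claim_ definition above) =====
theorem extract_side_spec : Claim_equal_extract_side := by
  intro ws _ _
  unfold Spec_extract_side extract_side extract_side_alt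
  cases ws with
  | nil => simp
  | cons w rest =>
    simp only [List.isEmpty_cons, Bool.false_eq_true, if_false]
    rw [pvStep_foldl_false]
    cases hf : (w :: rest).findIdx? (fun w => pvText w == ":") <;> simp
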